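-- pv_equiv track=rewrite | github.com/adith-p/A2Z_striver_dsa | daily_challenge/sortOddEven.py | sortOddEven
-- ===== SOURCE A (Python) =====
-- def sortOddEven(nums: list[int]) -> list[int]:
--     """
--     Sorts a list of integers, with odd numbers appearing before even numbers.
--
--     Args:
--         nums: The list of integers to be sorted.
--
--     Returns:
--         A new list with odd numbers followed by even numbers.
--     """
--
--     odd = []
--     even = []
--     arr = []
--     for i in nums:
--         if i % 2 == 0:
--             even.append(i)
--         else:
--             odd.append(i)
--
--     odd.sort()
--     even.sort(reverse=True)
--     arr = even + odd
--     i = 0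
--     while i < len(nums):
--         nums[i] = arr[i]
--         i += 1
--
--     return arr
-- ===== SOURCE B (Python) =====
-- def sortOddEven(nums: list[int]) -> list[int]:
--     """Single keyed sort: evens (key 0) before odds (key 1), evens descending, odds ascending."""
--     arr = sorted(nums, key=lambda x: (x % 2, -x if x % 2 == 0 else x))
--     nums[:] = arr
--     return arr
-- ===== Notes on version B (the rewrite author's own statement) =====
-- stated objective: idiomatic
-- what changed: A's odd/even partition pass plus two separate sorts and a manual write-back loop are replaced by one sort over the composite key (x % 2, -x if even else x), which puts evens (key 0) descending before odds (key 1) ascending; the same in-place mutation of nums is kept via slice assignment.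
import Mathlib
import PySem

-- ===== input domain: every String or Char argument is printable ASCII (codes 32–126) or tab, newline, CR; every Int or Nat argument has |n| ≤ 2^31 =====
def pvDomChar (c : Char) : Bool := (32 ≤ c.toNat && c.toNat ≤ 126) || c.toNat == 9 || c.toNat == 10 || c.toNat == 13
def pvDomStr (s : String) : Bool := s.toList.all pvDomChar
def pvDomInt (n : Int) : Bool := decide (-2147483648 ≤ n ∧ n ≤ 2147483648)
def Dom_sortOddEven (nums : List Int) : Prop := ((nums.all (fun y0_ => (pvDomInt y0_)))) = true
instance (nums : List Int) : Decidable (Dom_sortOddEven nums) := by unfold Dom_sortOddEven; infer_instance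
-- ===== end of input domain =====

-- B replaces A's partition + two sorts + write-back loop by ONE sort with a composite
-- key (x % 2, -x if even else x). Both Pythons mutate `nums` in place to the returned
-- order (A by an index loop, B by slice assignment); the theorems below are about the
-- RETURN value, which is the same list.

-- ===== PORT A =====
-- partition loop, then sort odds ascending, evens descending, concatenate.
-- (A's final while loop only writes arr back into nums; it does not affect the return value.)
def sortOddEven (nums : List Int) : List Int :=
  let p := nums.foldl
    (fun (oe : List Int × List Int) i =>
      if PySem.Int.mod i 2 = 0 then (oe.1, oe.2 ++ [i]) else (oe.1 ++ [i], oe.2))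
    ([], [])
  let odd := PySem.List.sorted p.1 (fun x => x) false
  let even := PySem.List.sorted p.2 (fun x => x) true
  even ++ odd

-- ===== PORT B =====
-- one stable sort keyed by the tuple (x % 2, -x if x % 2 == 0 else x)
def sortOddEven_alt (nums : List Int) : List Int :=
  PySem.List.sorted2 nums
    (fun x => PySem.Int.mod x 2)
    (fun x => if PySem.Int.mod x 2 = 0 then -x else x)
    false

-- ===== PRECONDITION & SPEC =====
def Spec_sortOddEven (nums : List Int) (out : List Int) : Prop := out = sortOddEven_alt nums
instance (nums : List Int) (out : List Int) : Decidable (Spec_sortOddEven nums out) := by unfold Spec_sortOddEven; infer_instance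

-- ===== CLAIM (what is proved, stated in full; the proofs are below) =====
def Claim_equal_sortOddEven : Prop := ∀ (nums : List Int), Dom_sortOddEven nums → Spec_sortOddEven nums (sortOddEven nums)

-- ===== LEMMAS AND PROOFS =====

-- B's comparison function (the `before` of sorted2 with these two keys)
def pvLex (p q u v : Int) : Bool :=
  decide (p < q) || (!decide (q < p) && decide (u < v))

def pvK2 (x : Int) : Int := if PySem.Int.mod x 2 = 0 then -x else x

def pvLt (a b : Int) : Bool :=
  pvLex (PySem.Int.mod a 2) (PySem.Int.mod b 2) (pvK2 a) (pvK2 b)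

lemma pvLex_asym {p q u v : Int} (h : pvLex p q u v = true) : pvLex q p v u = false := by
  simp [pvLex] at h ⊢
  omega

lemma pvLex_trans' {p q r u v w : Int} (h1 : pvLex p q u v = true)
    (h2 : pvLex r q w v = false) : pvLex r p w u = false := by
  simp [pvLex] at h1 h2 ⊢
  omega

lemma pvLt_asym {a b : Int} (h : pvLt a b = true) : pvLt b a = false :=
  pvLex_asym h

lemma pvLt_trans' {x y z : Int} (h1 : pvLt x y = true) (h2 : pvLt z y = false) :
    pvLt z x = false :=
  pvLex_trans' h1 h2

lemma pvLex_antisymm {p q u v : Int} (h1 : pvLex q p v u = false)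
    (h2 : pvLex p q u v = false) : p = q ∧ u = v := by
  simp [pvLex] at h1 h2
  omega

lemma pvLt_antisymm {a b : Int} (h1 : pvLt b a = false) (h2 : pvLt a b = false) : a = b := by
  obtain ⟨hm, hk2⟩ := pvLex_antisymm h1 h2
  rcases PySem.Int.mod_two_eq a with ha | ha <;> rcases PySem.Int.mod_two_eq b with hb | hb <;>
    simp [pvK2, ha, hb] at hk2 hm <;> omega

-- inserting with pvLt preserves "no later element is pvLt-below an earlier one"
lemma insertBy_pvLt_pairwise (x : Int) (ys : List Int)
    (h : ys.Pairwise (fun a b => pvLt b a = false)) :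
    (PySem.List.insertBy pvLt x ys).Pairwise (fun a b => pvLt b a = false) := by
  induction ys with
  | nil => simp [PySem.List.insertBy]
  | cons y ys ih =>
    rcases List.pairwise_cons.mp h with ⟨hy, hys⟩
    by_cases hxy : pvLt x y = true
    · simp only [PySem.List.insertBy, hxy, if_true]
      refine List.pairwise_cons.mpr ⟨?_, h⟩
      intro z hz
      rcases List.mem_cons.mp hz with rfl | hz
      · exact pvLt_asym hxy
      · exact pvLt_trans' hxy (hy z hz)
    · have hxy' : pvLt x y = false := by simpa using hxy
      simp only [PySem.List.insertBy, hxy']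
      refine List.pairwise_cons.mpr ⟨?_, ih hys⟩
      intro z hz
      rcases (PySem.List.mem_insertBy pvLt x z ys).mp hz with rfl | hz
      · exact hxy'
      · exact hy z hz

lemma foldl_insertBy_pvLt_pairwise (xs : List Int) :
    ∀ acc : List Int, acc.Pairwise (fun a b => pvLt b a = false) →
      (xs.foldl (fun acc x => PySem.List.insertBy pvLt x acc) acc).Pairwise
        (fun a b => pvLt b a = false) := by
  induction xs with
  | nil => intro acc h; simpa using h
  | cons x xs ih =>
    intro acc h
    exact ih _ (insertBy_pvLt_pairwise x acc h)

lemma alt_pairwise (nums : List Int) :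
    (sortOddEven_alt nums).Pairwise (fun a b => pvLt b a = false) := by
  have he : sortOddEven_alt nums =
      nums.foldl (fun acc x => PySem.List.insertBy pvLt x acc) [] := rfl
  rw [he]
  exact foldl_insertBy_pvLt_pairwise nums [] (by simp)

-- A's partition loop computes the two filters
lemma part_spec (l : List Int) : ∀ o e : List Int,
    l.foldl (fun (oe : List Int × List Int) i =>
        if PySem.Int.mod i 2 = 0 then (oe.1, oe.2 ++ [i]) else (oe.1 ++ [i], oe.2)) (o, e) =
      (o ++ l.filter (fun i => !decide (PySem.Int.mod i 2 = 0)),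
       e ++ l.filter (fun i => decide (PySem.Int.mod i 2 = 0))) := by
  induction l with
  | nil => intro o e; simp
  | cons i l ih =>
    intro o e
    rw [List.foldl_cons, List.filter_cons, List.filter_cons]
    by_cases hi : PySem.Int.mod i 2 = 0
    · have hdvd : 2 ∣ i := (PySem.Int.mod_eq_zero_iff_dvd i 2).mp hi
      rw [if_pos hi, ih]
      simp [hdvd]
    · have hmod : i % 2 = 1 := by
        have he : PySem.Int.mod i 2 = i % 2 := PySem.Int.mod_eq_emod_of_pos (by norm_num)
        rcases PySem.Int.mod_two_eq i with h | h
        · exact absurd h hi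
        · omega
      rw [if_neg hi, ih]
      simp [hmod]

lemma sortOddEven_eq (nums : List Int) :
    sortOddEven nums =
      PySem.List.sorted (nums.filter (fun i => decide (PySem.Int.mod i 2 = 0)))
        (fun x => x) true ++
      PySem.List.sorted (nums.filter (fun i => !decide (PySem.Int.mod i 2 = 0)))
        (fun x => x) false := by
  show PySem.List.sorted (nums.foldl _ ([], [])).2 (fun x => x) true ++
      PySem.List.sorted (nums.foldl _ ([], [])).1 (fun x => x) false = _
  rw [part_spec nums [] []]
  simp

lemma a_pairwise (nums : List Int) :
    (sortOddEven nums).Pairwise (fun a b => pvLt b a = false) := by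
  rw [sortOddEven_eq]
  refine List.pairwise_append.mpr ⟨?_, ?_, ?_⟩
  · refine (PySem.List.sorted_pairwise_rev _ _).imp_of_mem ?_
    intro a b ha hb hle
    have ha' : PySem.Int.mod a 2 = 0 := by
      have := (List.mem_filter.mp ((PySem.List.mem_sorted _ _ _ _).mp ha)).2
      simpa using this
    have hb' : PySem.Int.mod b 2 = 0 := by
      have := (List.mem_filter.mp ((PySem.List.mem_sorted _ _ _ _).mp hb)).2
      simpa using this
    simp only [pvLt, pvLex, pvK2, ha', hb']
    norm_num
    omega
  · refine (PySem.List.sorted_pairwise _ _).imp_of_mem ?_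
    intro a b ha hb hle
    have ha' : ¬ PySem.Int.mod a 2 = 0 := by
      have := (List.mem_filter.mp ((PySem.List.mem_sorted _ _ _ _).mp ha)).2
      simpa using this
    have hb' : ¬ PySem.Int.mod b 2 = 0 := by
      have := (List.mem_filter.mp ((PySem.List.mem_sorted _ _ _ _).mp hb)).2
      simpa using this
    have ha1 : PySem.Int.mod a 2 = 1 := by
      rcases PySem.Int.mod_two_eq a with h | h
      · exact absurd h ha'
      · exact h
    have hb1 : PySem.Int.mod b 2 = 1 := by
      rcases PySem.Int.mod_two_eq b with h | h
      · exact absurd h hb'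
      · exact h
    simp only [pvLt, pvLex, pvK2, ha1, hb1]
    norm_num
    omega
  · intro a ha b hb
    have ha' : PySem.Int.mod a 2 = 0 := by
      have := (List.mem_filter.mp ((PySem.List.mem_sorted _ _ _ _).mp ha)).2
      simpa using this
    have hb' : ¬ PySem.Int.mod b 2 = 0 := by
      have := (List.mem_filter.mp ((PySem.List.mem_sorted _ _ _ _).mp hb)).2
      simpa using this
    have hb1 : PySem.Int.mod b 2 = 1 := by
      rcases PySem.Int.mod_two_eq b with h | h
      · exact absurd h hb'
      · exact h
    simp only [pvLt, pvLex, ha', hb1]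
    norm_num

lemma a_perm (nums : List Int) : (sortOddEven nums).Perm nums := by
  rw [sortOddEven_eq]
  exact ((PySem.List.sorted_perm _ _ _).append (PySem.List.sorted_perm _ _ _)).trans
    (List.filter_append_perm (fun i => decide (PySem.Int.mod i 2 = 0)) nums)

-- ===== VERDICT (by name: the statement is the Claim_ definition above) =====
theorem sortOddEven_spec : Claim_equal_sortOddEven := by
  intro nums _
  show sortOddEven nums = sortOddEven_alt nums
  exact List.Perm.eq_of_pairwise (le := fun a b => pvLt b a = false)
    (fun a b _ _ h1 h2 => pvLt_antisymm (by exact h1) (by exact h2))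
    (a_pairwise nums) (alt_pairwise nums)
    ((a_perm nums).trans (PySem.List.sorted2_perm nums _ _ false).symm)
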